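-- pv_equiv track=rewrite | github.com/Lamsheeper/influence-benchmarking-hops | filter/ranked_stats.py | sort_functions_by_type
-- ===== SOURCE A (Python) =====
-- from typing import List, Dict, Any, Set
--
-- def get_available_function_pairs():
--     """Get list of available function pairs from the current token system."""
--     # Base tokens and their corresponding wrapper tokens (matching other scripts)
--     base_letters = ['G', 'J', 'K', 'L', 'M', 'N', 'O', 'P', 'Q', 'R']
--     wrapper_letters = ['F', 'I', 'H', 'S', 'T', 'U', 'V', 'W', 'X', 'Y']
--
--     # Constants: start with 5, 7, then increment by 2 for each pair
--     base_constants = [5, 7, 9, 11, 13, 15, 17, 19, 21, 23]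
--
--     function_pairs = []
--     for i in range(len(base_letters)):
--         base_token = f"<{base_letters[i]}N>"
--         wrapper_token = f"<{wrapper_letters[i]}N>"
--         constant = base_constants[i] if i < len(base_constants) else 5 + (i * 2)
--
--         function_pairs.append({
--             'base_token': base_token,
--             'wrapper_token': wrapper_token,
--             'constant': constant,
--             'base_letter': base_letters[i],
--             'wrapper_letter': wrapper_letters[i]
--         })
--
--     return function_pairs
--
-- def is_base_function(func_token: str) -> bool:
--     """Determine if a function token is a base function."""
--     function_pairs = get_available_function_pairs()
--     base_tokens = [pair['base_token'] for pair in function_pairs]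
--     return func_token in base_tokens
--
-- def is_wrapper_function(func_token: str) -> bool:
--     """Determine if a function token is a wrapper function."""
--     function_pairs = get_available_function_pairs()
--     wrapper_tokens = [pair['wrapper_token'] for pair in function_pairs]
--     return func_token in wrapper_tokens
--
-- def sort_functions_by_type(functions: List[str]) -> List[str]:
--     """Sort functions with base functions first, then wrapper functions."""
--     base_functions = [f for f in functions if is_base_function(f)]
--     wrapper_functions = [f for f in functions if is_wrapper_function(f)]
--     other_functions = [f for f in functions if not is_base_function(f) and not is_wrapper_function(f)]
--
--     # Sort each group alphabetically
--     base_functions.sort()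
--     wrapper_functions.sort()
--     other_functions.sort()
--
--     return base_functions + wrapper_functions + other_functions
-- ===== SOURCE B (Python) =====
-- # Single composite-key sort: rank (base=0, wrapper=1, other=2) then name,
-- # with the token sets built once instead of per-element re-derivation.
--
-- BASE_TOKENS = {f"<{c}N>" for c in "GJKLMNOPQR"}
-- WRAPPER_TOKENS = {f"<{c}N>" for c in "FIHSTUVWXY"}
--
--
-- def _rank(f: str) -> int:
--     return 0 if f in BASE_TOKENS else 1 if f in WRAPPER_TOKENS else 2
--
--
-- def sort_functions_by_type(functions):
--     """Sort functions with base functions first, then wrapper functions."""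
--     return sorted(functions, key=lambda f: (_rank(f), f))
-- ===== Notes on version B (the rewrite author's own statement) =====
-- stated objective: faster
-- what changed: Replaces three filter passes plus three independent sorts plus concatenation (each membership test rebuilding the pair table) with hoisted token sets and one stable sort by the composite key (rank, name).
import Mathlib
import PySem

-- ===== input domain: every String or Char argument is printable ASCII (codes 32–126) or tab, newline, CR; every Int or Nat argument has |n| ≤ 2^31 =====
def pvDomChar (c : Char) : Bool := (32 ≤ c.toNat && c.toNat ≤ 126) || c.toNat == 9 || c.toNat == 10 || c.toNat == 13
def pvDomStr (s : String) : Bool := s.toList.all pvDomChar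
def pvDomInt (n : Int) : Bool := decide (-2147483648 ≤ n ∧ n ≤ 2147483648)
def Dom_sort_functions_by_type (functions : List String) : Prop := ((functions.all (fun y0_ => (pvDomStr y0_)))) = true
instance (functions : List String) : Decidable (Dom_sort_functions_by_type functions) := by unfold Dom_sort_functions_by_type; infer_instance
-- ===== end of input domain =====

-- B replaces A's three filter passes + three sorts + concatenation by one stable
-- sort with the composite key (rank, name), the token sets hoisted out of the loop.

-- ===== PORT A =====
-- the per-pair dict has fixed string keys with heterogeneous values; ported as a record
structure FunctionPair where
  base_token : String
  wrapper_token : String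
  constant : Int
  base_letter : String
  wrapper_letter : String
deriving DecidableEq, Repr

def get_available_function_pairs : List FunctionPair :=
  let base_letters : List String := ["G", "J", "K", "L", "M", "N", "O", "P", "Q", "R"]
  let wrapper_letters : List String := ["F", "I", "H", "S", "T", "U", "V", "W", "X", "Y"]
  let base_constants : List Int := [5, 7, 9, 11, 13, 15, 17, 19, 21, 23]
  (PySem.List.pyRange 0 (PySem.List.len base_letters) 1).foldl (fun function_pairs i =>
    let base_token : String := "<" ++ PySem.List.pyGetD base_letters i "" ++ "N>"
    let wrapper_token : String := "<" ++ PySem.List.pyGetD wrapper_letters i "" ++ "N>"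
    let constant : Int :=
      if i < PySem.List.len base_constants then PySem.List.pyGetD base_constants i 0
      else 5 + i * 2
    function_pairs ++ [{ base_token := base_token, wrapper_token := wrapper_token,
                         constant := constant,
                         base_letter := PySem.List.pyGetD base_letters i "",
                         wrapper_letter := PySem.List.pyGetD wrapper_letters i "" }]) []

def is_base_function (func_token : String) : Bool :=
  let function_pairs := get_available_function_pairs
  let base_tokens := function_pairs.map (fun pair => pair.base_token)
  decide (func_token ∈ base_tokens)

def is_wrapper_function (func_token : String) : Bool :=
  let function_pairs := get_available_function_pairs
  let wrapper_tokens := function_pairs.map (fun pair => pair.wrapper_token)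
  decide (func_token ∈ wrapper_tokens)

def sort_functions_by_type (functions : List String) : List String :=
  let base_functions := functions.filter (fun f => is_base_function f)
  let wrapper_functions := functions.filter (fun f => is_wrapper_function f)
  let other_functions := functions.filter (fun f => !is_base_function f && !is_wrapper_function f)
  PySem.List.sorted base_functions (fun x => x) ++
    PySem.List.sorted wrapper_functions (fun x => x) ++
    PySem.List.sorted other_functions (fun x => x)

-- ===== PORT B =====
def pvBaseTokens : PySem.Set String :=
  PySem.Set.ofList ((("GJKLMNOPQR" : String).toList).map (fun c => String.ofList ['<', c, 'N', '>']))

def pvWrapperTokens : PySem.Set String :=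
  PySem.Set.ofList ((("FIHSTUVWXY" : String).toList).map (fun c => String.ofList ['<', c, 'N', '>']))

def pvRank (f : String) : Int :=
  if f ∈ pvBaseTokens then 0 else if f ∈ pvWrapperTokens then 1 else 2

def sort_functions_by_type_alt (functions : List String) : List String :=
  PySem.List.sorted2 functions pvRank (fun f => f)

-- ===== PRECONDITION & SPEC =====
def Spec_sort_functions_by_type (functions : List String) (out : List String) : Prop := out = sort_functions_by_type_alt functions
instance (functions : List String) (out : List String) : Decidable (Spec_sort_functions_by_type functions out) := by unfold Spec_sort_functions_by_type; infer_instance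

-- ===== CLAIM (what is proved, stated in full; the proofs are below) =====
def Claim_equal_sort_functions_by_type : Prop := ∀ (functions : List String), Dom_sort_functions_by_type functions → Spec_sort_functions_by_type functions (sort_functions_by_type functions)

-- ===== LEMMAS AND PROOFS =====

-- the composite sort key of B, as one lexicographically ordered value
def pvKey (f : String) : Lex (Int × String) := toLex (pvRank f, f)

theorem pvKey_injective : Function.Injective pvKey := by
  intro a b h
  simpa using congrArg (fun x => (ofLex x).2) h

theorem pvBaseTokens_eval :
    pvBaseTokens = ["<GN>", "<JN>", "<KN>", "<LN>", "<MN>", "<NN>", "<ON>", "<PN>", "<QN>", "<RN>"] := by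
  decide

theorem pvWrapperTokens_eval :
    pvWrapperTokens = ["<FN>", "<IN>", "<HN>", "<SN>", "<TN>", "<UN>", "<VN>", "<WN>", "<XN>", "<YN>"] := by
  decide

theorem base_tokens_eval :
    (get_available_function_pairs.map (fun pair => pair.base_token)) = pvBaseTokens := by
  decide

theorem wrapper_tokens_eval :
    (get_available_function_pairs.map (fun pair => pair.wrapper_token)) = pvWrapperTokens := by
  decide

theorem is_base_eq (f : String) : is_base_function f = decide (f ∈ pvBaseTokens) := by
  exact base_tokens_eval ▸ rfl

theorem is_wrapper_eq (f : String) : is_wrapper_function f = decide (f ∈ pvWrapperTokens) := by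
  exact wrapper_tokens_eval ▸ rfl

theorem base_not_wrapper {f : String} (h : f ∈ pvBaseTokens) : f ∉ pvWrapperTokens := by
  rw [pvBaseTokens_eval] at h
  rw [pvWrapperTokens_eval]
  simp only [List.mem_cons, List.not_mem_nil, or_false] at h
  rcases h with rfl | rfl | rfl | rfl | rfl | rfl | rfl | rfl | rfl | rfl <;> decide

theorem rank_of_base {f : String} (h : f ∈ pvBaseTokens) : pvRank f = 0 := by
  simp [pvRank, h]

theorem rank_of_wrapper {f : String} (h : f ∈ pvWrapperTokens) : pvRank f = 1 := by
  have hb : f ∉ pvBaseTokens := fun hb => base_not_wrapper hb h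
  simp [pvRank, hb, h]

theorem rank_of_other {f : String} (h1 : f ∉ pvBaseTokens) (h2 : f ∉ pvWrapperTokens) :
    pvRank f = 2 := by
  simp [pvRank, h1, h2]

theorem key_le_of_rank_lt {a b : String} (h : pvRank a < pvRank b) : pvKey a ≤ pvKey b := by
  rw [pvKey, pvKey, Prod.Lex.le_iff]
  exact Or.inl h

theorem key_le_of_rank_eq {a b : String} (h : pvRank a = pvRank b) (hle : a ≤ b) :
    pvKey a ≤ pvKey b := by
  rw [pvKey, pvKey, Prod.Lex.le_iff]
  exact Or.inr ⟨h, hle⟩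

-- B's sorted2 with keys (pvRank, id) is the sort by the single lex key pvKey
theorem alt_eq_sorted_key (functions : List String) :
    sort_functions_by_type_alt functions = PySem.List.sorted functions pvKey := by
  unfold sort_functions_by_type_alt PySem.List.sorted2 PySem.List.sorted
  have hb : (fun a b : String =>
        decide (pvRank a < pvRank b) || (!decide (pvRank b < pvRank a) && decide (a < b)))
      = fun a b : String => decide (pvKey a < pvKey b) := by
    funext a b
    by_cases h1 : pvRank a < pvRank b
    · simp [h1, pvKey, Prod.Lex.lt_iff]
    · by_cases h2 : pvRank b < pvRank a
      · have hne : ¬ pvRank a = pvRank b := ne_of_gt h2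
        simp [h1, h2, pvKey, Prod.Lex.lt_iff, hne]
      · have heq : pvRank a = pvRank b := le_antisymm (le_of_not_gt h2) (le_of_not_gt h1)
        simp [pvKey, Prod.Lex.lt_iff, heq]
  simp only [Bool.false_eq_true, if_false]
  rw [hb]

-- the three filters of A, concatenated, permute the input (base/wrapper disjoint)
theorem filter_tri_perm (xs : List String)
    (hdis : ∀ f : String, is_base_function f = true → is_wrapper_function f = false) :
    (xs.filter (fun f => is_base_function f) ++ xs.filter (fun f => is_wrapper_function f) ++
      xs.filter (fun f => !is_base_function f && !is_wrapper_function f)).Perm xs := by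
  induction xs with
  | nil => simp
  | cons x t ih =>
    by_cases hp : is_base_function x = true
    · -- x lands in the base group, at its head
      simp only [List.filter_cons, hp, hdis x hp, Bool.not_true, Bool.false_and,
        Bool.false_eq_true, if_false, if_true]
      simpa using ih.cons x
    · have hp' : is_base_function x = false := by simpa using hp
      by_cases hq : is_wrapper_function x = true
      · -- x lands in the wrapper group, at its head
        simp only [List.filter_cons, hp', hq, Bool.not_true, Bool.and_false,
          Bool.false_eq_true, if_false, if_true]
        exact (List.perm_middle.append_right _).trans (by simpa using ih.cons x)
      · -- x lands in the other group, at its head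
        have hq' : is_wrapper_function x = false := by simpa using hq
        simp only [List.filter_cons, hp', hq', Bool.not_false, Bool.true_and,
          Bool.false_eq_true, if_false, if_true]
        exact List.perm_middle.trans (ih.cons x)

theorem disjoint_preds (f : String) (h : is_base_function f = true) : is_wrapper_function f = false := by
  rw [is_base_eq] at h
  rw [is_wrapper_eq]
  simpa using base_not_wrapper (of_decide_eq_true h)

-- ===== VERDICT (by name: the statement is the Claim_ definition above) =====
theorem sort_functions_by_type_spec : Claim_equal_sort_functions_by_type := by
  intro functions _
  unfold Spec_sort_functions_by_type
  rw [alt_eq_sorted_key]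
  unfold sort_functions_by_type
  -- rank facts for each group
  have hrank0 : ∀ f ∈ functions.filter (fun f => is_base_function f), pvRank f = 0 := by
    intro f hf
    have := (List.mem_filter.mp hf).2
    rw [is_base_eq] at this
    exact rank_of_base (of_decide_eq_true this)
  have hrank1 : ∀ f ∈ functions.filter (fun f => is_wrapper_function f), pvRank f = 1 := by
    intro f hf
    have := (List.mem_filter.mp hf).2
    rw [is_wrapper_eq] at this
    exact rank_of_wrapper (of_decide_eq_true this)
  have hrank2 : ∀ f ∈ functions.filter (fun f => !is_base_function f && !is_wrapper_function f),
      pvRank f = 2 := by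
    intro f hf
    have h := (List.mem_filter.mp hf).2
    simp only [Bool.and_eq_true, Bool.not_eq_true'] at h
    rw [is_base_eq] at *
    rw [is_wrapper_eq] at *
    exact rank_of_other (by simpa using h.1) (by simpa using h.2)
  -- each sorted group is pairwise key-≤ (constant rank + alphabetical order)
  have group_pairwise : ∀ (l : List String) (r : Int), (∀ f ∈ l, pvRank f = r) →
      (PySem.List.sorted l (fun x => x)).Pairwise (fun a b => pvKey a ≤ pvKey b) := by
    intro l r hr
    refine (PySem.List.sorted_pairwise l (fun x => x)).imp_of_mem ?_
    intro a b ha hb hab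
    have ha' := hr a ((PySem.List.mem_sorted l (fun x => x) false a).mp ha)
    have hb' := hr b ((PySem.List.mem_sorted l (fun x => x) false b).mp hb)
    exact key_le_of_rank_eq (ha'.trans hb'.symm) hab
  have cross : ∀ (l₁ l₂ : List String) (r₁ r₂ : Int), r₁ < r₂ →
      (∀ f ∈ l₁, pvRank f = r₁) → (∀ f ∈ l₂, pvRank f = r₂) →
      ∀ a ∈ PySem.List.sorted l₁ (fun x => x), ∀ b ∈ PySem.List.sorted l₂ (fun x => x),
        pvKey a ≤ pvKey b := by
    intro l₁ l₂ r₁ r₂ hlt h1 h2 a ha b hb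
    have ha' := h1 a ((PySem.List.mem_sorted l₁ (fun x => x) false a).mp ha)
    have hb' := h2 b ((PySem.List.mem_sorted l₂ (fun x => x) false b).mp hb)
    exact key_le_of_rank_lt (by rw [ha', hb']; exact hlt)
  -- A's result is pairwise key-≤
  have pairwiseA : (PySem.List.sorted (functions.filter (fun f => is_base_function f)) (fun x => x) ++
      PySem.List.sorted (functions.filter (fun f => is_wrapper_function f)) (fun x => x) ++
      PySem.List.sorted (functions.filter (fun f => !is_base_function f && !is_wrapper_function f)) (fun x => x)).Pairwise
        (fun a b => pvKey a ≤ pvKey b) := by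
    rw [List.append_assoc, List.pairwise_append]
    refine ⟨group_pairwise _ 0 hrank0, ?_, ?_⟩
    · rw [List.pairwise_append]
      exact ⟨group_pairwise _ 1 hrank1, group_pairwise _ 2 hrank2,
        cross _ _ 1 2 (by norm_num) hrank1 hrank2⟩
    · intro a ha b hb
      rcases List.mem_append.mp hb with hb | hb
      · exact cross _ _ 0 1 (by norm_num) hrank0 hrank1 a ha b hb
      · exact cross _ _ 0 2 (by norm_num) hrank0 hrank2 a ha b hb
  -- A's result permutes the input
  have permA : (PySem.List.sorted (functions.filter (fun f => is_base_function f)) (fun x => x) ++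
      PySem.List.sorted (functions.filter (fun f => is_wrapper_function f)) (fun x => x) ++
      PySem.List.sorted (functions.filter (fun f => !is_base_function f && !is_wrapper_function f)) (fun x => x)).Perm
        functions := by
    refine List.Perm.trans ?_ (filter_tri_perm functions disjoint_preds)
    exact ((PySem.List.sorted_perm _ _ _).append (PySem.List.sorted_perm _ _ _)).append
      (PySem.List.sorted_perm _ _ _)
  -- B's result: sorted by pvKey
  have pairwiseB := PySem.List.sorted_pairwise functions pvKey
  have permB : (PySem.List.sorted functions pvKey).Perm functions :=
    PySem.List.sorted_perm functions pvKey false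
  exact PySem.List.eq_of_perm_of_pairwise_le_of_injective pvKey pvKey_injective
    (permA.trans permB.symm) pairwiseA pairwiseB
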